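-- pv_equiv track=rewrite | github.com/imfifc/myocr | ocr_structuring/core/utils/str_util.py | contain_continue_nums
-- ===== SOURCE A (Python) =====
-- def contain_continue_nums(text, num_count=10) -> bool:
--     """
--     判断一个字符串中是否包含固定多个连续的数字
--     :param text:
--     :param num_count: 连续数字的个数
--     :return:
--     """
--     if not text and num_count == 0:
--         return True
--
--     if not text:
--         return False
--
--     count = 0
--     max_count = 0
--     for c in text:
--         if str.isdigit(c):
--             count += 1
--             max_count = max(max_count, count)
--         else:
--             count = 0
--
--     if max_count >= num_count:
--         return True
--
--     return False
-- ===== SOURCE B (Python) =====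
-- def contain_continue_nums(text, num_count=10) -> bool:
--     """Run-based scan: jump over each maximal digit run instead of keeping a per-char counter."""
--     if not text:
--         return num_count == 0
--     if num_count <= 0:
--         return True
--     i = 0
--     while i < len(text):
--         if text[i].isdigit():
--             j = i
--             while j < len(text) and text[j].isdigit():
--                 j += 1
--             if j - i >= num_count:
--                 return True
--             i = j
--         else:
--             i += 1
--     return False
-- ===== Notes on version B (the rewrite author's own statement) =====
-- stated objective: alternative
-- what changed: B replaces A's per-character running counter with a run-based scan that locates each maximal digit run and compares its length to num_count directly (plus an explicit num_count<=0 guard instead of comparing against a computed max).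
import Mathlib
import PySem

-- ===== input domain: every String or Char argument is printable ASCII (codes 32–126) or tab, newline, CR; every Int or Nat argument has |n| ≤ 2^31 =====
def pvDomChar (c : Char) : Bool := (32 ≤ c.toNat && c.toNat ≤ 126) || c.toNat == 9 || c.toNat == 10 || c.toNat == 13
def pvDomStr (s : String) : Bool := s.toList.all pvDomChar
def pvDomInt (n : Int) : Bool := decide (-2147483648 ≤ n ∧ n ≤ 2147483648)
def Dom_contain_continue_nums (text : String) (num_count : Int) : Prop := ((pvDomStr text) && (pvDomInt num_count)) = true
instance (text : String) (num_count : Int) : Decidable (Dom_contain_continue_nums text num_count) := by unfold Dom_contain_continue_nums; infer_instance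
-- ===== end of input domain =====

-- B replaces A's per-character running counter with a run-based scan over maximal digit runs; alternative decomposition, same cost.

-- ===== PORT A =====
def contain_continue_nums (text : String) (num_count : Int) : Bool :=
  let cs := text.toList
  if cs.isEmpty && (num_count == 0) then true
  else if cs.isEmpty then false
  else
    let p := cs.foldl (fun (p : Int × Int) c =>
      if PySem.Chars.isdigit c then (p.1 + 1, max p.2 (p.1 + 1)) else (0, p.2)) (0, 0)
    decide (p.2 ≥ num_count)

-- ===== PORT B =====
-- inner while loop in Source B counts the digit run starting at i (takeWhile) and jumps past it (dropWhile)
def altRuns (num_count : Int) (cs : List Char) : Bool :=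
  match cs with
  | [] => false
  | c :: rest =>
    if PySem.Chars.isdigit c then
      if (1 + (rest.takeWhile PySem.Chars.isdigit).length : Int) ≥ num_count then true
      else altRuns num_count (rest.dropWhile PySem.Chars.isdigit)
    else altRuns num_count rest
termination_by cs.length
decreasing_by
  · exact Nat.lt_succ_of_le (List.length_dropWhile_le _ _)
  · exact Nat.lt_succ_of_le (Nat.le_refl _)

def contain_continue_nums_alt (text : String) (num_count : Int) : Bool :=
  let cs := text.toList
  if cs.isEmpty then num_count == 0
  else if num_count ≤ 0 then true
  else altRuns num_count cs

-- ===== PRECONDITION & SPEC =====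
def Spec_contain_continue_nums (text : String) (num_count : Int) (out : Bool) : Prop := out = contain_continue_nums_alt text num_count
instance (text : String) (num_count : Int) (out : Bool) : Decidable (Spec_contain_continue_nums text num_count out) := by unfold Spec_contain_continue_nums; infer_instance

-- ===== CLAIM (what is proved, stated in full; the proofs are below) =====
def Claim_equal_contain_continue_nums : Prop := ∀ (text : String) (num_count : Int), Dom_contain_continue_nums text num_count → Spec_contain_continue_nums text num_count (contain_continue_nums text num_count)

-- ===== LEMMAS AND PROOFS =====

-- proof-only helper: A's counter loop rephrased as a Bool recursion with the current run length as state
def good (n : Int) (c : Int) : List Char → Bool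
  | [] => false
  | x :: xs =>
    if PySem.Chars.isdigit x then
      if c + 1 ≥ n then true else good n (c + 1) xs
    else good n 0 xs

theorem foldA_char (n : Int) (cs : List Char) : ∀ (c m : Int), 0 ≤ c → 0 ≤ m →
    decide ((cs.foldl (fun (p : Int × Int) x =>
      if PySem.Chars.isdigit x then (p.1 + 1, max p.2 (p.1 + 1)) else (0, p.2)) (c, m)).2 ≥ n)
      = (decide (m ≥ n) || good n c cs) := by
  induction cs with
  | nil => intro c m _ _; simp [good]
  | cons x xs ih =>
    intro c m hc hm
    by_cases hd : PySem.Chars.isdigit x = true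
    · simp only [List.foldl_cons, hd, if_true, good]
      rw [ih (c + 1) (max m (c + 1)) (by omega) (by omega)]
      by_cases h1 : c + 1 ≥ n
      · simp [h1]
      · simp [h1]
    · simp only [List.foldl_cons, hd, if_false, good, Bool.false_eq_true]
      rw [ih 0 m (le_refl 0) hm]

theorem good_run (n : Int) (cs : List Char) : ∀ (c : Int), c < n →
    good n c cs = (decide (c + ((cs.takeWhile PySem.Chars.isdigit).length : Int) ≥ n)
      || good n 0 (cs.dropWhile PySem.Chars.isdigit)) := by
  induction cs with
  | nil => intro c hc; simp [good, List.takeWhile, List.dropWhile]; omega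
  | cons x xs ih =>
    intro c hc
    by_cases hd : PySem.Chars.isdigit x = true
    · simp only [good, hd, if_true, List.takeWhile_cons_of_pos hd, List.dropWhile_cons_of_pos hd,
        List.length_cons]
      by_cases h1 : c + 1 ≥ n
      · have hlen : (0:Int) ≤ (xs.takeWhile PySem.Chars.isdigit).length := Int.natCast_nonneg _
        simp only [h1, if_true, Bool.true_eq, Bool.or_eq_true, decide_eq_true_eq]
        left; push_cast; omega
      · rw [if_neg h1, ih (c + 1) (by omega)]
        congr 1
        simp only [decide_eq_decide]
        push_cast; omega
    · simp only [good, hd, if_false, List.takeWhile_cons_of_neg hd, List.dropWhile_cons_of_neg hd,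
        List.length_nil, Bool.false_eq_true]
      simp only [Nat.cast_zero, add_zero]
      have hdec : decide (c ≥ n) = false := decide_eq_false (by omega)
      rw [hdec, Bool.false_or]

theorem good_eq_altRuns (n : Int) (hn : 0 < n) : ∀ (cs : List Char), good n 0 cs = altRuns n cs := by
  have H : ∀ (k : Nat) (cs : List Char), cs.length ≤ k → good n 0 cs = altRuns n cs := by
    intro k
    induction k with
    | zero =>
      intro cs h
      have : cs = [] := List.length_eq_zero_iff.mp (Nat.le_zero.mp h)
      subst this; simp [good, altRuns]
    | succ k ih =>
      intro cs h
      match cs with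
      | [] => simp [good, altRuns]
      | x :: xs =>
          by_cases hd : PySem.Chars.isdigit x = true
          · have hg := good_run n (x :: xs) 0 hn
            rw [List.takeWhile_cons_of_pos hd, List.dropWhile_cons_of_pos hd] at hg
            rw [hg]
            have hrec : good n 0 (xs.dropWhile PySem.Chars.isdigit) = altRuns n (xs.dropWhile PySem.Chars.isdigit) :=
              ih _ (le_trans (List.length_dropWhile_le _ _) (Nat.le_of_succ_le_succ h))
            rw [hrec]
            simp only [altRuns, hd, if_true, List.length_cons]
            split_ifs with h1
            · simp only [Bool.or_eq_true, decide_eq_true_eq]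
              left; push_cast; omega
            · cases halt : altRuns n (xs.dropWhile PySem.Chars.isdigit) with
              | true => simp
              | false =>
                simp only [Bool.or_false]
                apply decide_eq_false
                push_cast
                omega
          · have h0 : good n 0 (x :: xs) = good n 0 xs := by simp [good, hd]
            have h1 : altRuns n (x :: xs) = altRuns n xs := by simp [altRuns, hd]
            rw [h0, h1]
            exact ih xs (Nat.le_of_succ_le_succ h)
  intro cs
  exact H cs.length cs (Nat.le_refl _)

-- ===== VERDICT (by name: the statement is the Claim_ definition above) =====
theorem contain_continue_nums_spec : Claim_equal_contain_continue_nums := by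
  intro text n _
  unfold Spec_contain_continue_nums contain_continue_nums contain_continue_nums_alt
  by_cases he : text.toList.isEmpty = true
  · by_cases h0 : n = 0 <;> simp [he, h0]
  · simp only [he, Bool.false_and, if_false, Bool.false_eq_true]
    rw [foldA_char n text.toList 0 0 (le_refl 0) (le_refl 0)]
    by_cases hn : n ≤ 0
    · simp [hn]
    · have h0 : decide ((0:Int) ≥ n) = false := by simp; omega
      rw [h0, Bool.false_or, if_neg hn, good_eq_altRuns n (by omega)]
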